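-- pv_equiv track=rewrite | github.com/arturukrainian/footballistika-web | app.py | _top_with_user
-- ===== SOURCE A (Python) =====
-- def _top_with_user(rows, user_id, limit=10):
--     top = []
--     user_row = None
--     for idx, row in enumerate(rows, start=1):
--         entry = {**row, "rank": idx}
--         if idx <= limit:
--             top.append(entry)
--         if row.get("user_id") == user_id and user_row is None:
--             user_row = entry
--     return top, user_row
-- ===== SOURCE B (Python) =====
-- def _top_with_user(rows, user_id, limit=10):
--     rows = list(rows)
--     top = []
--     for i, row in enumerate(rows, start=1):
--         if i > limit:
--             break
--         top.append({**row, "rank": i})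
--     user_row = None
--     for i, row in enumerate(rows, start=1):
--         if row.get("user_id") == user_id:
--             user_row = {**row, "rank": i}
--             break
--     return top, user_row
-- ===== Notes on version B (the rewrite author's own statement) =====
-- stated objective: alternative
-- what changed: The single fused loop that threads both accumulators is split into two independent early-terminating scans: one builds the ranked top list and breaks once the limit is passed, the other finds the first row matching user_id and breaks immediately.
import Mathlib
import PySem

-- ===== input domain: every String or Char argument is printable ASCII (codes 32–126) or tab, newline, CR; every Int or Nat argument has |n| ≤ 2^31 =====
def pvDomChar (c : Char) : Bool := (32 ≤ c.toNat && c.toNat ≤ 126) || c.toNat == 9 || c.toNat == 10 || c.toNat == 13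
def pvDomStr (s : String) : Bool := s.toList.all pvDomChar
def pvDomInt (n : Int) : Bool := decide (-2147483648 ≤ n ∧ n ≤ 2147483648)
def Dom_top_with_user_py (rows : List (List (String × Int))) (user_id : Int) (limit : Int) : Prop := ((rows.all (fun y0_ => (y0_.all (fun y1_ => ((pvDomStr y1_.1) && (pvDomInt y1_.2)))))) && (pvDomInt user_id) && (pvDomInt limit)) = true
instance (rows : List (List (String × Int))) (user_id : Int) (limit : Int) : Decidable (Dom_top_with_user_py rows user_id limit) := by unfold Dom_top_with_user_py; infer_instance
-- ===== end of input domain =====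

-- B replaces A's single fused loop by two independent early-terminating scans (same O(n) cost).

-- dict helpers shared by both ports (dict = assoc list, first-match lookup, overwrite-in-place update)
-- row.get(k) : first match, none if absent  (exact Python dict.get for unique-key dicts)
def pvGetKV (l : List (String × Int)) (k : String) : Option Int :=
  match l with
  | [] => none
  | (k', v) :: rest => if k' = k then some v else pvGetKV rest k

-- {**row, k: v} : overwrite k in place if present, else append  (exact Python dict merge for unique-key dicts)
def pvSetKV (l : List (String × Int)) (k : String) (v : Int) : List (String × Int) :=
  match l with
  | [] => [(k, v)]
  | (k', v') :: rest => if k' = k then (k, v) :: rest else (k', v') :: pvSetKV rest k v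

-- ===== PORT A =====
-- A's single for-loop over enumerate(rows, start=1) threading both accumulators
def aGo (user_id limit : Int) (idx : Int) (rs : List (List (String × Int)))
    (top : List (List (String × Int))) (user_row : Option (List (String × Int))) :
    (List (List (String × Int))) × (Option (List (String × Int))) :=
  match rs with
  | [] => (top, user_row)
  | row :: rest =>
    let entry := pvSetKV row "rank" idx
    let top' := if idx ≤ limit then top ++ [entry] else top
    let user_row' := if pvGetKV row "user_id" = some user_id ∧ user_row = none
                     then some entry else user_row
    aGo user_id limit (idx + 1) rest top' user_row'

def top_with_user_py (rows : List (List (String × Int))) (user_id : Int) (limit : Int) : (List (List (String × Int))) × (Option (List (String × Int))) :=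
  aGo user_id limit 1 rows [] none

-- ===== PORT B =====
-- first loop of Source B: build the ranked top list, break once i > limit
def bTop (limit : Int) (i : Int) (rs : List (List (String × Int))) : List (List (String × Int)) :=
  match rs with
  | [] => []
  | row :: rest => if limit < i then [] else pvSetKV row "rank" i :: bTop limit (i + 1) rest

-- second loop of Source B: first row with row.get("user_id") == user_id, with its global rank; break on match
def bFind (user_id : Int) (i : Int) (rs : List (List (String × Int))) : Option (List (String × Int)) :=
  match rs with
  | [] => none
  | row :: rest => if pvGetKV row "user_id" = some user_id
                   then some (pvSetKV row "rank" i) else bFind user_id (i + 1) rest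

def top_with_user_py_alt (rows : List (List (String × Int))) (user_id : Int) (limit : Int) : (List (List (String × Int))) × (Option (List (String × Int))) :=
  (bTop limit 1 rows, bFind user_id 1 rows)

-- ===== PRECONDITION & SPEC =====
def Spec_top_with_user_py (rows : List (List (String × Int))) (user_id : Int) (limit : Int) (out : (List (List (String × Int))) × (Option (List (String × Int)))) : Prop := out = top_with_user_py_alt rows user_id limit
instance (rows : List (List (String × Int))) (user_id : Int) (limit : Int) (out : (List (List (String × Int))) × (Option (List (String × Int)))) : Decidable (Spec_top_with_user_py rows user_id limit out) := by unfold Spec_top_with_user_py; infer_instance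

-- ===== CLAIM (what is proved, stated in full; the proofs are below) =====
def Claim_equal_top_with_user_py : Prop := ∀ (rows : List (List (String × Int))) (user_id : Int) (limit : Int), Dom_top_with_user_py rows user_id limit → Spec_top_with_user_py rows user_id limit (top_with_user_py rows user_id limit)

-- ===== LEMMAS AND PROOFS =====

theorem bTop_gt (limit : Int) (rs : List (List (String × Int))) (i : Int) (h : limit < i) :
    bTop limit i rs = [] := by
  cases rs with
  | nil => simp [bTop]
  | cons row rest => simp [bTop, h]

-- invariant of A's loop: its state equals top ++ B's truncated build, and user_row once set is kept,
-- otherwise it is B's first-match scan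
theorem aGo_eq (user_id limit : Int) (rs : List (List (String × Int))) :
    ∀ (idx : Int) (top : List (List (String × Int))) (user_row : Option (List (String × Int))),
    aGo user_id limit idx rs top user_row =
      (top ++ bTop limit idx rs,
       match user_row with
       | some u => some u
       | none => bFind user_id idx rs) := by
  induction rs with
  | nil =>
    intro idx top user_row
    cases user_row <;> simp [aGo, bTop, bFind]
  | cons row rest ih =>
    intro idx top user_row
    simp only [aGo, ih]
    by_cases hle : idx ≤ limit
    · have hlt : ¬ limit < idx := not_lt.mpr hle
      cases user_row with
      | some u => simp [hle, hlt, bTop]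
      | none =>
        by_cases hm : pvGetKV row "user_id" = some user_id
        · simp [hle, hlt, hm, bTop, bFind]
        · simp [hle, hlt, hm, bTop, bFind]
    · have hlt : limit < idx := not_le.mp hle
      have hlt' : limit < idx + 1 := by omega
      cases user_row with
      | some u => simp [hle, hlt, bTop, bTop_gt _ _ _ hlt']
      | none =>
        by_cases hm : pvGetKV row "user_id" = some user_id
        · simp [hle, hlt, hm, bTop, bFind, bTop_gt _ _ _ hlt']
        · simp [hle, hlt, hm, bTop, bFind, bTop_gt _ _ _ hlt']

-- ===== VERDICT (by name: the statement is the Claim_ definition above) =====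
theorem top_with_user_py_spec : Claim_equal_top_with_user_py := by
  intro rows user_id limit _
  unfold Spec_top_with_user_py top_with_user_py top_with_user_py_alt
  rw [aGo_eq]
  simp
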